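-- pv_equiv track=rewrite | github.com/Japneet001/Coding-World-Cup-2023 | DAY 38 (AUS vs BAN)/Man of the Match.py | happyPlayers
-- ===== SOURCE A (Python) =====
-- from typing import List
--
-- def happyPlayers(balls : List[int]) -> int:
--     # Write your code here.
--     li=[]
--     dup=[]
--     for i in range (len(balls)):
--         if balls[i] not in li:
--             li.append(balls[i])
--         else:
--             dup.append(balls[i])
--     dup.sort()
--     if (len(dup)==0):
--         return -1
--     return dup[len(dup)-1]
--     pass
-- ===== SOURCE B (Python) =====
-- from typing import List
--
-- def happyPlayers(balls : List[int]) -> int: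
--     # Sort a copy once, then one adjacent-comparison pass; the last
--     # adjacent equal pair in the ascending list is the max duplicate.
--     s = sorted(balls)
--     ans = -1
--     for prev, cur in zip(s, s[1:]):
--         if prev == cur:
--             ans = cur
--     return ans
-- ===== Notes on version B (the rewrite author's own statement) =====
-- stated objective: simpler
-- what changed: Replaces the seen/dup lists with quadratic membership scans plus a final sort of the duplicates by a single sort of the input and one adjacent-equality pass that tracks the last matching value.
import Mathlib
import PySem

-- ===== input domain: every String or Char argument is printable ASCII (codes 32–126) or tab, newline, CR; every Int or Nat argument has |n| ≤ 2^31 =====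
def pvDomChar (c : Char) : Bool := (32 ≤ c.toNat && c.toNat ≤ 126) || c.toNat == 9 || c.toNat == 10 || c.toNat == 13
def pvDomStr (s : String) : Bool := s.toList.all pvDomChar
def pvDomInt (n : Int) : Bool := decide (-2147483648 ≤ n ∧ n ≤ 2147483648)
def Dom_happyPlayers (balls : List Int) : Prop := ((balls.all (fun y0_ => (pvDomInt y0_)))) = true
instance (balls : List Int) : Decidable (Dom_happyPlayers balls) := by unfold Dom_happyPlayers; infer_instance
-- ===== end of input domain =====

-- B sorts a copy of the input once and makes one adjacent-equality pass instead of
-- A's quadratic seen/dup list maintenance plus a final sort (objective: simpler/faster).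

-- ===== PORT A =====
def happyPlayers (balls : List Int) : Int :=
  let st := (PySem.List.pyRange 0 (PySem.List.len balls) 1).foldl
    (fun (st : List Int × List Int) i =>
      if PySem.List.pyGetD balls i 0 ∉ st.1 then
        (st.1 ++ [PySem.List.pyGetD balls i 0], st.2)
      else
        (st.1, st.2 ++ [PySem.List.pyGetD balls i 0]))
    ([], [])
  let ds := PySem.List.sorted st.2 (fun v => v) false
  if PySem.List.len ds = 0 then -1
  else PySem.List.pyGetD ds (PySem.List.len ds - 1) 0

-- ===== PORT B =====
def happyPlayers_alt (balls : List Int) : Int :=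
  let s := PySem.List.sorted balls (fun v => v) false
  (s.zip (PySem.List.slice s (some 1) none)).foldl
    (fun ans p => if p.1 = p.2 then p.2 else ans) (-1)

-- ===== PRECONDITION & SPEC =====
def Spec_happyPlayers (balls : List Int) (out : Int) : Prop := out = happyPlayers_alt balls
instance (balls : List Int) (out : Int) : Decidable (Spec_happyPlayers balls out) := by unfold Spec_happyPlayers; infer_instance

-- ===== CLAIM (what is proved, stated in full; the proofs are below) =====
def Claim_equal_happyPlayers : Prop := ∀ (balls : List Int), Dom_happyPlayers balls → Spec_happyPlayers balls (happyPlayers balls)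

-- ===== LEMMAS AND PROOFS =====

/-- The answer both programs compute: the maximum value occurring at least twice, else -1. -/
def IsAns (l : List Int) (r : Int) : Prop :=
  ((∃ x ∈ l, 2 ≤ l.count x) → r ∈ l ∧ 2 ≤ l.count r ∧ ∀ x ∈ l, 2 ≤ l.count x → x ≤ r) ∧
  ((¬ ∃ x ∈ l, 2 ≤ l.count x) → r = -1)

lemma IsAns_unique (l : List Int) (r₁ r₂ : Int) (h₁ : IsAns l r₁) (h₂ : IsAns l r₂) : r₁ = r₂ := by
  by_cases h : ∃ x ∈ l, 2 ≤ l.count x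
  · obtain ⟨m1, c1, max1⟩ := h₁.1 h
    obtain ⟨m2, c2, max2⟩ := h₂.1 h
    exact le_antisymm (max2 r₁ m1 c1) (max1 r₂ m2 c2)
  · rw [h₁.2 h, h₂.2 h]

/-- A's loop step. -/
def astep (st : List Int × List Int) (x : Int) : List Int × List Int :=
  if x ∉ st.1 then (st.1 ++ [x], st.2) else (st.1, st.2 ++ [x])

lemma count_cons_flip (x a : Int) (l : List Int) :
    List.count x (a :: l) = List.count x l + if x = a then 1 else 0 := by
  rw [List.count_cons]
  by_cases h : x = a
  · simp [h]
  · simp [h, Ne.symm h]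

lemma count_append_singleton (y a : Int) (p : List Int) :
    List.count y (p ++ [a]) = List.count y p + (if y = a then 1 else 0) := by
  rw [List.count_append]
  congr 1
  by_cases h : y = a
  · simp [h]
  · simp [List.count_cons, Ne.symm h, h]

lemma astep_inv (l : List Int) : ∀ (p li dup : List Int),
    (∀ x, x ∈ li ↔ x ∈ p) → (∀ x, x ∈ dup ↔ 2 ≤ p.count x) →
    ∀ x, x ∈ (l.foldl astep (li, dup)).2 ↔ 2 ≤ (p ++ l).count x := by
  induction l with
  | nil => intro p li dup hli hdup x; simpa using hdup x
  | cons a t ih =>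
    intro p li dup hli hdup x
    rw [List.foldl_cons]
    by_cases ha : a ∈ li
    · have ha' : a ∈ p := (hli a).1 ha
      have hstep : astep (li, dup) a = (li, dup ++ [a]) := by simp [astep, ha]
      rw [hstep]
      have hres := ih (p ++ [a]) li (dup ++ [a])
        (fun y => by
          rw [List.mem_append, List.mem_singleton]
          constructor
          · exact fun h => Or.inl ((hli y).1 h)
          · rintro (h | rfl)
            · exact (hli y).2 h
            · exact ha)
        (fun y => by
          rw [List.mem_append, List.mem_singleton, count_append_singleton]
          by_cases hy : y = a
          · subst hy
            have h1 : 1 ≤ List.count y p := List.one_le_count_iff.2 ha'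
            simp only [or_true, true_iff, if_true]
            omega
          · simp [hy, hdup y])
        x
      rw [List.append_assoc, List.singleton_append] at hres
      exact hres
    · have ha' : a ∉ p := fun h => ha ((hli a).2 h)
      have hstep : astep (li, dup) a = (li ++ [a], dup) := by simp [astep, ha]
      rw [hstep]
      have hres := ih (p ++ [a]) (li ++ [a]) dup
        (fun y => by simp [List.mem_append, hli y])
        (fun y => by
          rw [count_append_singleton]
          by_cases hy : y = a
          · subst hy
            have h0 : List.count y p = 0 := List.count_eq_zero.2 ha'
            simp only [if_true, h0, hdup y]
            omega
          · simp [hy, hdup y])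
        x
      rw [List.append_assoc, List.singleton_append] at hres
      exact hres

/-- Membership characterisation of A's dup list. -/
lemma adup_mem (balls : List Int) :
    ∀ x, x ∈ (balls.foldl astep ([], [])).2 ↔ 2 ≤ balls.count x := by
  have := astep_inv balls [] [] [] (by simp) (by simp)
  simpa using this

/-- A computes IsAns. -/
lemma A_isAns (balls : List Int) : IsAns balls (happyPlayers balls) := by
  have hlam : (fun (st : List Int × List Int) i =>
        if PySem.List.pyGetD balls i 0 ∉ st.1 then (st.1 ++ [PySem.List.pyGetD balls i 0], st.2)
        else (st.1, st.2 ++ [PySem.List.pyGetD balls i 0]))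
      = fun st i => astep st (PySem.List.pyGetD balls i 0) := rfl
  have hfold : happyPlayers balls =
      (let ds := PySem.List.sorted (balls.foldl astep ([], [])).2 (fun v => v) false
       if PySem.List.len ds = 0 then -1
       else PySem.List.pyGetD ds (PySem.List.len ds - 1) 0) := by
    unfold happyPlayers
    rw [hlam, PySem.List.foldl_pyRange_zero_pyGetD balls 0 astep ([], [])]
  set dup := (balls.foldl astep ([], [])).2 with hdupdef
  set ds := PySem.List.sorted dup (fun v => v) false with hds
  have hmem : ∀ x, x ∈ ds ↔ 2 ≤ balls.count x := by
    intro x; rw [hds, PySem.List.mem_sorted]; exact adup_mem balls x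
  by_cases hex : ∃ x ∈ balls, 2 ≤ balls.count x
  · obtain ⟨w, hw, hcw⟩ := hex
    have hwds : w ∈ ds := (hmem w).2 hcw
    have hne : ds ≠ [] := fun h => by simp [h] at hwds
    have hlen : ¬ (PySem.List.len ds = 0) := by
      simp [PySem.List.len_eq]
      exact fun h => hne h
    have hlast : happyPlayers balls = ds.getLast hne := by
      rw [hfold]
      simp only [hlen, if_false]
      have h1 : (0:Int) ≤ PySem.List.len ds - 1 := by
        simp [PySem.List.len_eq]
        have : 0 < ds.length := List.length_pos_iff.2 hne
        omega
      rw [PySem.List.len_eq, PySem.List.pyGetD_of_nonneg ds 0 (by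
        have : 0 < ds.length := List.length_pos_iff.2 hne
        omega)]
      have h2 : ((ds.length : Int) - 1).toNat = ds.length - 1 := by omega
      rw [h2, List.getD_eq_getElem _ _ (by
        have : 0 < ds.length := List.length_pos_iff.2 hne
        omega)]
      rw [List.getLast_eq_getElem]
    have hpw : ds.Pairwise (· ≤ ·) := by
      have := PySem.List.sorted_pairwise dup (fun v => v) (κ := Int)
      simpa [hds] using this
    have hr : happyPlayers balls ∈ ds := hlast ▸ List.getLast_mem hne
    constructor
    · intro _
      refine ⟨?_, (hmem _).1 hr, ?_⟩
      · have := (hmem _).1 hr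
        exact List.count_pos_iff.1 (by omega)
      · intro x hx hcx
        have hxds : x ∈ ds := (hmem x).2 hcx
        rw [hlast]
        exact List.Pairwise.rel_getLast (R := (· ≤ ·)) hpw hxds
    · intro h; exact absurd ⟨w, hw, hcw⟩ h
  · constructor
    · intro h; exact absurd h hex
    · intro _
      have hnil : ds = [] := by
        cases hd : ds with
        | nil => rfl
        | cons a t =>
          exfalso
          have ha : a ∈ ds := by simp [hd]
          have hca : 2 ≤ balls.count a := (hmem a).1 ha
          have : a ∈ balls := List.count_pos_iff.1 (by omega)
          exact hex ⟨a, this, hca⟩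
      rw [hfold]
      simp [hnil, PySem.List.len_eq]

/-- B's fold over adjacent pairs. -/
def bfold (acc : Int) (s : List Int) : Int :=
  (s.zip (s.drop 1)).foldl (fun ans p => if p.1 = p.2 then p.2 else ans) acc

lemma bfold_cons_cons (acc a b : Int) (t : List Int) :
    bfold acc (a :: b :: t) = bfold (if a = b then b else acc) (b :: t) := rfl

lemma bfold_noDup (s : List Int) : ∀ acc, (¬ ∃ x ∈ s, 2 ≤ s.count x) → bfold acc s = acc := by
  induction s with
  | nil => intro acc _; rfl
  | cons a t ih =>
    intro acc hno
    cases t with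
    | nil => rfl
    | cons b u =>
      rw [bfold_cons_cons]
      have hab : a ≠ b := by
        intro h
        subst h
        exact hno ⟨a, by simp, by simp⟩
      rw [if_neg hab]
      apply ih
      rintro ⟨x, hx, hcx⟩
      refine hno ⟨x, by simp [hx], ?_⟩
      have : (a :: b :: u).count x = (b :: u).count x + if x = a then 1 else 0 :=
        count_cons_flip x a (b :: u)
      omega

lemma bfold_dup (s : List Int) : ∀ acc, s.Pairwise (· ≤ ·) → (∃ x ∈ s, 2 ≤ s.count x) →
    bfold acc s ∈ s ∧ 2 ≤ s.count (bfold acc s) ∧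
      ∀ x ∈ s, 2 ≤ s.count x → x ≤ bfold acc s := by
  induction s with
  | nil => intro acc _ h; simp at h
  | cons a t ih =>
    intro acc hpw hex
    cases t with
    | nil =>
      exfalso
      obtain ⟨x, hx, hcx⟩ := hex
      simp at hx
      subst hx
      simp at hcx
    | cons b u =>
      rw [bfold_cons_cons]
      have hpt : (b :: u).Pairwise (· ≤ ·) := (List.pairwise_cons.1 hpw).2
      have hale : ∀ y ∈ b :: u, a ≤ y := (List.pairwise_cons.1 hpw).1
      have hble : ∀ y ∈ u, b ≤ y := (List.pairwise_cons.1 hpt).1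
      by_cases hab : a = b
      · subst hab
        rw [if_pos rfl]
        by_cases h2 : ∃ x ∈ a :: u, 2 ≤ (a :: u).count x
        · obtain ⟨hr1, hr2, hr3⟩ := ih a hpt h2
          set r := bfold a (a :: u) with hr
          have hmemr : r ∈ a :: a :: u := by simp at hr1 ⊢; tauto
          refine ⟨hmemr, ?_, ?_⟩
          · have : (a :: a :: u).count r = (a :: u).count r + if r = a then 1 else 0 :=
              count_cons_flip r a (a :: u)
            omega
          · intro x hx hcx
            have har : a ≤ r := hale r hr1
            by_cases hxa : x = a
            · subst hxa; exact har
            · have hxmem : x ∈ a :: u := by simp at hx; tauto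
              have : (a :: a :: u).count x = (a :: u).count x := by
                rw [count_cons_flip, if_neg hxa]; simp
              exact hr3 x hxmem (by omega)
        · have hb : bfold a (a :: u) = a := bfold_noDup (a :: u) a h2
          rw [hb]
          refine ⟨by simp, ?_, ?_⟩
          · simp
          · intro x hx hcx
            by_cases hxa : x = a
            · subst hxa; exact le_rfl
            · exfalso
              have hxmem : x ∈ a :: u := by simp at hx; tauto
              have : (a :: a :: u).count x = (a :: u).count x := by
                rw [count_cons_flip, if_neg hxa]; simp
              exact h2 ⟨x, hxmem, by omega⟩
      · rw [if_neg hab]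
        have halt : a < b := lt_of_le_of_ne (hale b (by simp)) hab
        have hanotin : a ∉ b :: u := by
          intro h
          rcases List.mem_cons.1 h with h | h
          · exact hab h
          · have := hble a h
            omega
        have hcnt : ∀ x, x ≠ a → (a :: b :: u).count x = (b :: u).count x := by
          intro x hx; rw [count_cons_flip, if_neg hx]; simp
        have hca : (a :: b :: u).count a = 1 := by
          have h0 : (b :: u).count a = 0 := List.count_eq_zero.2 hanotin
          rw [count_cons_flip, h0]; simp
        have h2 : ∃ x ∈ b :: u, 2 ≤ (b :: u).count x := by
          obtain ⟨x, hx, hcx⟩ := hex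
          have hxa : x ≠ a := by intro h; subst h; omega
          refine ⟨x, ?_, ?_⟩
          · rcases List.mem_cons.1 hx with h | h
            · exact absurd h hxa
            · exact h
          · rw [← hcnt x hxa]; exact hcx
        obtain ⟨hr1, hr2, hr3⟩ := ih acc hpt h2
        set r := bfold acc (b :: u) with hr
        have hra : r ≠ a := by intro h; rw [h] at hr1; exact hanotin hr1
        refine ⟨by simp at hr1 ⊢; tauto, by rw [hcnt r hra]; exact hr2, ?_⟩
        intro x hx hcx
        have hxa : x ≠ a := by intro h; subst h; omega
        have hxmem : x ∈ b :: u := by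
          rcases List.mem_cons.1 hx with h | h
          · exact absurd h hxa
          · exact h
        exact hr3 x hxmem (by rw [← hcnt x hxa]; exact hcx)

/-- B computes IsAns. -/
lemma B_isAns (balls : List Int) : IsAns balls (happyPlayers_alt balls) := by
  set s := PySem.List.sorted balls (fun v => v) false with hs
  have halt : happyPlayers_alt balls = bfold (-1) s := by
    unfold happyPlayers_alt bfold
    dsimp only
    rw [PySem.List.slice_from _ (by norm_num : (0:Int) ≤ 1)]
    simp [← hs]
  have hperm : s.Perm balls := PySem.List.sorted_perm balls (fun v => v) false
  have hcnt : ∀ x, s.count x = balls.count x := fun x => hperm.count_eq x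
  have hmem : ∀ x, x ∈ s ↔ x ∈ balls := fun x => hperm.mem_iff
  have hpw : s.Pairwise (· ≤ ·) := by
    have := PySem.List.sorted_pairwise balls (fun v => v) (κ := Int)
    simpa [hs] using this
  rw [halt]
  by_cases hex : ∃ x ∈ balls, 2 ≤ balls.count x
  · have hex' : ∃ x ∈ s, 2 ≤ s.count x := by
      obtain ⟨x, hx, hcx⟩ := hex
      exact ⟨x, (hmem x).2 hx, by rw [hcnt]; exact hcx⟩
    obtain ⟨hr1, hr2, hr3⟩ := bfold_dup s (-1) hpw hex'
    constructor
    · intro _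
      refine ⟨(hmem _).1 hr1, by rw [← hcnt]; exact hr2, ?_⟩
      intro x hx hcx
      exact hr3 x ((hmem x).2 hx) (by rw [hcnt]; exact hcx)
    · intro h; exact absurd hex h
  · have hex' : ¬ ∃ x ∈ s, 2 ≤ s.count x := by
      rintro ⟨x, hx, hcx⟩
      exact hex ⟨x, (hmem x).1 hx, by rw [← hcnt]; exact hcx⟩
    exact ⟨fun h => absurd h (by
      rintro ⟨x, hx, hcx⟩
      exact hex ⟨x, hx, hcx⟩), fun _ => bfold_noDup s (-1) hex'⟩

-- ===== VERDICT (by name: the statement is the Claim_ definition above) =====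
theorem happyPlayers_spec : Claim_equal_happyPlayers := by
  intro balls _
  unfold Spec_happyPlayers
  exact IsAns_unique balls _ _ (A_isAns balls) (B_isAns balls)
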